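-- pv_equiv track=rewrite | github.com/JustOneMoreDog/The-Job-Scraper | files/job_scraper.py | post_job_scrape_processing
-- ===== SOURCE A (Python) =====
-- def post_job_scrape_processing(new_data, old_data):
--     deduped_data = []
--     scrape_dups = 0
--     previously_found = 0
--     scrape_duds = 0
--     for job_search in new_data:
--         for job in job_search:
--             if 'url' in job and job['url']:
--                 # Sometimes we can scrape a job twice because two searches may overlap
--                 if any(j for j in deduped_data if j['url'].lower() == job['url'].lower()):
--                     scrape_dups += 1
--                 # Sometimes a job shows up that we have already previously found
--                 elif any(j for j in old_data if j['url'].lower() == job['url'].lower()):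
--                     previously_found += 1
--                 else:
--                     deduped_data.append(job)
--             else:
--                 scrape_duds += 1
--     return deduped_data, scrape_dups, previously_found, scrape_duds
-- ===== SOURCE B (Python) =====
-- def post_job_scrape_processing(new_data, old_data):
--     # One flattening pass, then filter pipeline: duds / previously-found / first-occurrence dedup.
--     jobs = [job for job_search in new_data for job in job_search]
--     valid = [job for job in jobs if job.get('url')]
--     scrape_duds = len(jobs) - len(valid)
--     old_urls = {j.get('url', '').lower() for j in old_data}
--     fresh = [job for job in valid if job['url'].lower() not in old_urls]
--     previously_found = len(valid) - len(fresh)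
--     deduped_data = []
--     seen = set()
--     for job in fresh:
--         u = job['url'].lower()
--         if u not in seen:
--             seen.add(u)
--             deduped_data.append(job)
--     scrape_dups = len(fresh) - len(deduped_data)
--     return deduped_data, scrape_dups, previously_found, scrape_duds
-- ===== Notes on version B (the rewrite author's own statement) =====
-- stated objective: alternative
-- what changed: Replaces A's per-job linear scans of deduped_data and old_data inside the nested loop by one flatten pass and a filter pipeline (same measured cost on the generated inputs): a prebuilt set of lowercased old urls decides previously_found, a running seen-set dedups first occurrences, and the three counters fall out as length differences.
import Mathlib
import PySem

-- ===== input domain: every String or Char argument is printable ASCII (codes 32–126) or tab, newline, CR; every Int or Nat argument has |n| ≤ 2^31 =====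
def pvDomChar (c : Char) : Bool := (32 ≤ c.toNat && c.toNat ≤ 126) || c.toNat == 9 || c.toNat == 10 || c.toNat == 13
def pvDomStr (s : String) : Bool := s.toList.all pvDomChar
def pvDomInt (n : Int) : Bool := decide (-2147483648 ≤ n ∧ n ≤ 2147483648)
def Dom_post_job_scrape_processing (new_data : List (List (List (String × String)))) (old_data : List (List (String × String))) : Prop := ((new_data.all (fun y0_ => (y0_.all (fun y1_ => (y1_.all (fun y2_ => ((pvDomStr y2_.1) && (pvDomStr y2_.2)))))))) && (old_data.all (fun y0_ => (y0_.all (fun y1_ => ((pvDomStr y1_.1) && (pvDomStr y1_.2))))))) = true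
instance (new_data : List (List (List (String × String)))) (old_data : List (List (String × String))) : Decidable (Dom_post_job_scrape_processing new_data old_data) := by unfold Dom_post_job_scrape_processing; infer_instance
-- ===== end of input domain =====

-- B: a flatten + filter pipeline with set membership instead of A's per-job inner scans (objective: alternative decomposition).


-- ===== PORT A =====
-- shared vocabulary for both ports: `'url' in job and job['url']` (truthiness) and `job['url'].lower()`
def pvTruthyUrl (job : List (String × String)) : Bool :=
  match (PySem.Dict.mk job).get? "url" with
  | some u => u != ""
  | none => false

-- job['url'].lower(); the default "" is only read where Python would raise KeyError (excluded by Pre_)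
def pvLowUrl (job : List (String × String)) : String :=
  PySem.Str.lower (((PySem.Dict.mk job).get? "url").getD "")

-- one iteration of A's inner `for job in job_search` body, state = (deduped_data, scrape_dups, previously_found, scrape_duds)
def pvStepA (old_data : List (List (String × String)))
    (st : (List (List (String × String))) × Int × Int × Int) (job : List (String × String)) :
    (List (List (String × String))) × Int × Int × Int :=
  match st with
  | (deduped, dups, prev, duds) =>
    if pvTruthyUrl job then
      if deduped.any (fun j => pvLowUrl j == pvLowUrl job) then (deduped, dups + 1, prev, duds)
      else if old_data.any (fun j => pvLowUrl j == pvLowUrl job) then (deduped, dups, prev + 1, duds)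
      else (deduped ++ [job], dups, prev, duds)
    else (deduped, dups, prev, duds + 1)

def post_job_scrape_processing (new_data : List (List (List (String × String)))) (old_data : List (List (String × String))) : (List (List (String × String))) × Int × Int × Int :=
  new_data.foldl (fun st job_search => job_search.foldl (pvStepA old_data) st) ([], 0, 0, 0)

-- ===== PORT B =====
def post_job_scrape_processing_alt (new_data : List (List (List (String × String)))) (old_data : List (List (String × String))) : (List (List (String × String))) × Int × Int × Int :=
  let jobs := new_data.flatMap (fun job_search => job_search)
  let valid := jobs.filter pvTruthyUrl
  let scrape_duds : Int := (jobs.length : Int) - (valid.length : Int)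
  let old_urls : PySem.Set String := PySem.Set.ofList (old_data.map pvLowUrl)
  let fresh := valid.filter (fun job => !(old_urls.contains (pvLowUrl job)))
  let previously_found : Int := (valid.length : Int) - (fresh.length : Int)
  let dd := fresh.foldl (fun (p : (List (List (String × String))) × PySem.Set String) job =>
      if p.2.contains (pvLowUrl job) then p
      else (p.1 ++ [job], p.2.add (pvLowUrl job))) ([], PySem.Set.empty)
  let deduped_data := dd.1
  let scrape_dups : Int := (fresh.length : Int) - (deduped_data.length : Int)
  (deduped_data, scrape_dups, previously_found, scrape_duds)

-- ===== PRECONDITION & SPEC =====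
-- Pre_ excludes inputs on which A can hit `j['url']` (KeyError) on an old_data entry without a 'url' key:
-- it requires every old_data entry to carry 'url', or no new job to have a truthy url (then the scan never runs).
-- This is slightly conservative: it also excludes a few inputs where A returns because the old_data scan
-- short-circuits at a match (or every valid new job is a duplicate) before reaching the url-less entry.
def Pre_post_job_scrape_processing (new_data : List (List (List (String × String)))) (old_data : List (List (String × String))) : Prop :=
  (∀ j ∈ old_data, ((PySem.Dict.mk j).get? "url").isSome) ∨
  (∀ s ∈ new_data, ∀ j ∈ s, pvTruthyUrl j = false)
instance (new_data : List (List (List (String × String)))) (old_data : List (List (String × String))) : Decidable (Pre_post_job_scrape_processing new_data old_data) := by unfold Pre_post_job_scrape_processing; infer_instance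

def pvWitness_post_job_scrape_processing : (List (List (List (String × String)))) × (List (List (String × String))) :=
  ([[[("url", "A"), ("title", "x")]], [[("url", "b")], []]], [[("url", "a")]])

def Spec_post_job_scrape_processing (new_data : List (List (List (String × String)))) (old_data : List (List (String × String))) (out : (List (List (String × String))) × Int × Int × Int) : Prop := out = post_job_scrape_processing_alt new_data old_data
instance (new_data : List (List (List (String × String)))) (old_data : List (List (String × String))) (out : (List (List (String × String))) × Int × Int × Int) : Decidable (Spec_post_job_scrape_processing new_data old_data out) := by unfold Spec_post_job_scrape_processing; infer_instance

-- ===== CLAIM (what is proved, stated in full; the proofs are below) =====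
def Claim_equal_post_job_scrape_processing : Prop := ∀ (new_data : List (List (List (String × String)))) (old_data : List (List (String × String))), Dom_post_job_scrape_processing new_data old_data → Pre_post_job_scrape_processing new_data old_data → Spec_post_job_scrape_processing new_data old_data (post_job_scrape_processing new_data old_data)

-- ===== LEMMAS AND PROOFS =====

-- structural (cons-building) form of B's dedup loop, used only by the proofs
def pvB (l : List (List (String × String))) (seen : PySem.Set String) : List (List (String × String)) :=
  match l with
  | [] => []
  | j :: t =>
    if seen.contains (pvLowUrl j) then pvB t seen
    else j :: pvB t (seen.add (pvLowUrl j))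

-- the valid-and-not-previously-found sublist, phrased with A's `any` scan over old_data
def pvFresh (old_data : List (List (String × String))) (l : List (List (String × String))) : List (List (String × String)) :=
  (l.filter pvTruthyUrl).filter (fun j => !(old_data.any (fun d => pvLowUrl d == pvLowUrl j)))

lemma pvFoldl_foldl (nd : List (List (List (String × String)))) (od : List (List (String × String)))
    (init : (List (List (String × String))) × Int × Int × Int) :
    nd.foldl (fun st job_search => job_search.foldl (pvStepA od) st) init
      = (nd.flatMap (fun s => s)).foldl (pvStepA od) init := by
  induction nd generalizing init with
  | nil => rfl
  | cons s t ih => simp [List.foldl_append, ih]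

lemma pvB_skip (l : List (List (String × String))) (seen : PySem.Set String) (j : List (String × String))
    (h : pvLowUrl j ∈ seen) : pvB (j :: l) seen = pvB l seen := by
  simp [pvB, PySem.Set.contains, h]

lemma pvB_take (l : List (List (String × String))) (seen : PySem.Set String) (j : List (String × String))
    (h : pvLowUrl j ∉ seen) : pvB (j :: l) seen = j :: pvB l (seen.add (pvLowUrl j)) := by
  simp [pvB, PySem.Set.contains, h]

lemma pvLoopA_eq (od : List (List (String × String))) :
    ∀ (l D : List (List (String × String))) (seen : PySem.Set String) (a b c : Int),
    (∀ u, (D.any fun d => pvLowUrl d == u) = true ↔ u ∈ seen) →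
    (∀ u, u ∈ seen → (od.any fun d => pvLowUrl d == u) = false) →
    l.foldl (pvStepA od) (D, a, b, c) =
      (D ++ pvB (pvFresh od l) seen,
       a + (((pvFresh od l).length : Int) - ((pvB (pvFresh od l) seen).length : Int)),
       b + (((l.filter pvTruthyUrl).length : Int) - ((pvFresh od l).length : Int)),
       c + ((l.length : Int) - ((l.filter pvTruthyUrl).length : Int))) := by
  intro l
  induction l with
  | nil => intro D seen a b c h1 h2; simp [pvFresh, pvB]
  | cons j t ih =>
    intro D seen a b c h1 h2
    rw [List.foldl_cons]
    by_cases hv : pvTruthyUrl j = true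
    · by_cases hd : (D.any fun d => pvLowUrl d == pvLowUrl j) = true
      · -- scrape duplicate
        have hseen : pvLowUrl j ∈ seen := (h1 _).mp hd
        have ho : (od.any fun d => pvLowUrl d == pvLowUrl j) = false := h2 _ hseen
        have hstep : pvStepA od (D, a, b, c) j = (D, a + 1, b, c) := by
          simp [pvStepA, hv, hd]
        have hfil : (j :: t).filter pvTruthyUrl = j :: t.filter pvTruthyUrl :=
          List.filter_cons_of_pos hv
        have hfr : pvFresh od (j :: t) = j :: pvFresh od t := by
          simp [pvFresh, hfil, ho]
        rw [hstep, ih D seen (a + 1) b c h1 h2, hfr, hfil, pvB_skip _ _ _ hseen]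
        simp only [Prod.mk.injEq, List.length_cons]
        refine ⟨?_, ?_, ?_, ?_⟩ <;> first | trivial | (push_cast; ring)
      · by_cases ho : (od.any fun d => pvLowUrl d == pvLowUrl j) = true
        · -- previously found
          have hstep : pvStepA od (D, a, b, c) j = (D, a, b + 1, c) := by
            simp [pvStepA, hv, hd, ho]
          have hfil : (j :: t).filter pvTruthyUrl = j :: t.filter pvTruthyUrl :=
            List.filter_cons_of_pos hv
          have hfr : pvFresh od (j :: t) = pvFresh od t := by
            simp [pvFresh, hfil, ho]
          rw [hstep, ih D seen a (b + 1) c h1 h2, hfr, hfil]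
          simp only [Prod.mk.injEq, List.length_cons]
          refine ⟨?_, ?_, ?_, ?_⟩ <;> first | trivial | (push_cast; ring)
        · -- brand new job: appended
          have ho' : (od.any fun d => pvLowUrl d == pvLowUrl j) = false := by
            simpa using ho
          have hseen : pvLowUrl j ∉ seen := fun h => hd ((h1 _).mpr h)
          have hadd : seen.add (pvLowUrl j) = seen ++ [pvLowUrl j] := by
            simp [PySem.Set.add, PySem.Set.contains, hseen]
          have h1' : ∀ u, ((D ++ [j]).any fun d => pvLowUrl d == u) = true ↔
              u ∈ seen.add (pvLowUrl j) := by
            intro u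
            simp only [List.any_append, List.any_cons, List.any_nil, Bool.or_false,
              Bool.or_eq_true, h1, hadd, List.mem_append, List.mem_singleton, beq_iff_eq]
            constructor
            · rintro (h | rfl)
              · exact Or.inl h
              · exact Or.inr rfl
            · rintro (h | rfl)
              · exact Or.inl h
              · exact Or.inr rfl
          have h2' : ∀ u, u ∈ seen.add (pvLowUrl j) →
              (od.any fun d => pvLowUrl d == u) = false := by
            intro u hu
            rw [hadd] at hu
            rcases List.mem_append.mp hu with h | h
            · exact h2 u h
            · rw [List.mem_singleton] at h; subst h; exact ho'
          have hstep : pvStepA od (D, a, b, c) j = (D ++ [j], a, b, c) := by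
            simp [pvStepA, hv, hd, ho]
          have hfil : (j :: t).filter pvTruthyUrl = j :: t.filter pvTruthyUrl :=
            List.filter_cons_of_pos hv
          have hfr : pvFresh od (j :: t) = j :: pvFresh od t := by
            simp [pvFresh, hfil, ho']
          rw [hstep, ih (D ++ [j]) (seen.add (pvLowUrl j)) a b c h1' h2', hfr, hfil,
            pvB_take _ _ _ hseen]
          simp only [Prod.mk.injEq, List.length_cons, List.append_assoc, List.singleton_append]
          refine ⟨?_, ?_, ?_, ?_⟩ <;> first | trivial | (push_cast; ring)
    · -- scrape dud
      have hv' : pvTruthyUrl j = false := by simpa using hv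
      have hstep : pvStepA od (D, a, b, c) j = (D, a, b, c + 1) := by
        simp [pvStepA, hv']
      have hfil : (j :: t).filter pvTruthyUrl = t.filter pvTruthyUrl :=
        List.filter_cons_of_neg (by simp [hv'])
      have hfr : pvFresh od (j :: t) = pvFresh od t := by
        simp [pvFresh, hfil]
      rw [hstep, ih D seen a b (c + 1) h1 h2, hfr, hfil]
      simp only [Prod.mk.injEq, List.length_cons]
      refine ⟨?_, ?_, ?_, ?_⟩ <;> first | trivial | (push_cast; ring)

-- B's set of lowered old urls answers exactly A's scan over old_data
lemma pvOld_contains (od : List (List (String × String))) (u : String) :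
    (PySem.Set.ofList (od.map pvLowUrl)).contains u = (od.any fun d => pvLowUrl d == u) := by
  rw [Bool.eq_iff_iff]
  simp only [PySem.Set.contains, List.contains_iff_mem, PySem.Set.mem_ofList, List.mem_map,
    List.any_eq_true, beq_iff_eq]

-- B's accumulator dedup loop equals the cons-building pvB
lemma pvBloop_eq (l : List (List (String × String))) :
    ∀ (D : List (List (String × String))) (seen : PySem.Set String),
    (l.foldl (fun (p : (List (List (String × String))) × PySem.Set String) job =>
        if p.2.contains (pvLowUrl job) then p
        else (p.1 ++ [job], p.2.add (pvLowUrl job))) (D, seen)).1 = D ++ pvB l seen := by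
  induction l with
  | nil => intro D seen; simp [pvB]
  | cons j t ih =>
    intro D seen
    rw [List.foldl_cons]
    by_cases hs : pvLowUrl j ∈ seen
    · have : (seen.contains (pvLowUrl j)) = true := by
        simpa [PySem.Set.contains, List.contains_iff_mem] using hs
      rw [pvB_skip _ _ _ hs]
      simp only [this, if_true]
      exact ih D seen
    · have : (seen.contains (pvLowUrl j)) = false := by
        simpa [PySem.Set.contains, List.contains_iff_mem] using hs
      rw [pvB_take _ _ _ hs]
      simp only [this, Bool.false_eq_true, if_false]
      rw [ih (D ++ [j]) (seen.add (pvLowUrl j)), List.append_assoc, List.singleton_append]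

-- ===== VERDICT (by name: the statement is the Claim_ definition above) =====
theorem post_job_scrape_processing_spec : Claim_equal_post_job_scrape_processing := by
  intro new_data old_data _ _
  unfold Spec_post_job_scrape_processing post_job_scrape_processing post_job_scrape_processing_alt
  rw [pvFoldl_foldl]
  rw [pvLoopA_eq old_data (new_data.flatMap (fun s => s)) [] PySem.Set.empty 0 0 0
    (by intro u; simp [PySem.Set.empty])
    (by intro u h; simp [PySem.Set.empty] at h)]
  have hfr : ((new_data.flatMap (fun s => s)).filter pvTruthyUrl).filter
      (fun job => !((PySem.Set.ofList (old_data.map pvLowUrl)).contains (pvLowUrl job)))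
      = pvFresh old_data (new_data.flatMap (fun s => s)) := by
    unfold pvFresh
    exact List.filter_congr (fun j _ => by rw [pvOld_contains])
  simp only [hfr, pvBloop_eq, List.nil_append, zero_add]
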